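-- pv_equiv track=rewrite | github.com/chitoperalta/rubberize | rubberize/magics.py | _split_percent_fmt
-- ===== SOURCE A (Python) =====
-- def _split_percent_fmt(src: str) -> list[tuple[str, str]]:
--     lines = src.splitlines()
--     chunks: list[tuple[str, list[str]]] = []
--     cur_marker = ""
--     cur_body: list[str] = []
--     saw_percent = False
--
--     for line in lines:
--         stripped = line.lower().lstrip()
--         if stripped.startswith("# %%"):
--             # commit previous chunk
--             if cur_body or saw_percent:
--                 chunks.append((cur_marker, cur_body))
--                 cur_body = []
--
--             # parse marker: remove `# %%` and trim the rest
--             cur_marker = stripped.removeprefix("# %%").strip()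
--             saw_percent = True
--         else:
--             cur_body.append(line)
--     chunks.append((cur_marker, cur_body))
--
--     return [(m, "\n".join(b).rstrip()) for m, b in chunks]
-- ===== SOURCE B (Python) =====
-- def _split_percent_fmt(src: str) -> list[tuple[str, str]]:
--     lines = src.splitlines()
--
--     def is_marker(line):
--         return line.lower().lstrip().startswith("# %%")
--
--     def marker_text(line):
--         return line.lower().lstrip().removeprefix("# %%").strip()
--
--     def finalize(body):
--         return "\n".join(body).rstrip()
--
--     def span(rest):
--         k = 0
--         while k < len(rest) and not is_marker(rest[k]):
--             k += 1
--         return rest[:k], rest[k:]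
--
--     def tail_chunks(m, rest):
--         body, rest2 = span(rest)
--         if not rest2:
--             return [(m, finalize(body))]
--         return [(m, finalize(body))] + tail_chunks(marker_text(rest2[0]), rest2[1:])
--
--     pre, rest = span(lines)
--     if not rest:
--         return [("", finalize(pre))]
--     head = [] if not pre else [("", finalize(pre))]
--     return head + tail_chunks(marker_text(rest[0]), rest[1:])
-- ===== Notes on version B (the rewrite author's own statement) =====
-- stated objective: alternative
-- what changed: Replaced A's one-pass state machine (chunks/cur_marker/cur_body/saw_percent accumulator fold) by a recursive span decomposition: take the pre-marker prefix, then recursively split the rest at each marker line with takeWhile/dropWhile-style spans.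
import Mathlib
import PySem

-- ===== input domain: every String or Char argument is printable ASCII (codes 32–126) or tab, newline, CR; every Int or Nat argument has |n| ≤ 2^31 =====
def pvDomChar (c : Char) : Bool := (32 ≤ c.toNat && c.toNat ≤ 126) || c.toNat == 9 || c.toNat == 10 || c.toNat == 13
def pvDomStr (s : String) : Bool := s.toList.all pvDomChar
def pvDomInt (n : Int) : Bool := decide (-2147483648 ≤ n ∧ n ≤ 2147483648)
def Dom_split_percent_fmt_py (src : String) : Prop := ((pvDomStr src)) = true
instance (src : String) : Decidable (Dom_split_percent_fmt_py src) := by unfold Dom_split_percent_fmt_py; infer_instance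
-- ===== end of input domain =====

-- B replaces A's one-pass state machine by a recursive span decomposition (alternative structure, same cost).

-- shared helpers (the same text-level operations both Pythons perform)
-- str.removeprefix is not in PySem: ported by hand, exact (drop the prefix iff it is a prefix)
def pvRemovePrefix (s p : String) : String :=
  if PySem.Str.startswith s p then String.ofList (s.toList.drop p.toList.length) else s

def pvIsMark (line : String) : Bool :=
  PySem.Str.startswith (PySem.Str.lstrip (PySem.Str.lower line)) "# %%"

def pvMarkText (line : String) : String :=
  PySem.Str.strip (pvRemovePrefix (PySem.Str.lstrip (PySem.Str.lower line)) "# %%")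

def pvFin (b : List String) : String := PySem.Str.rstrip (PySem.Str.join "\n" b)

-- ===== PORT A =====
-- the for-loop of A: state (chunks, cur_marker, cur_body, saw_percent)
def pvLoopA : List String → List (String × List String) → String → List String → Bool → List (String × List String)
  | [], chunks, m, body, _ => chunks ++ [(m, body)]
  | l :: ls, chunks, m, body, saw =>
    let stripped := PySem.Str.lstrip (PySem.Str.lower l)
    if PySem.Str.startswith stripped "# %%" then
      if !body.isEmpty || saw then
        pvLoopA ls (chunks ++ [(m, body)]) (PySem.Str.strip (pvRemovePrefix stripped "# %%")) [] true
      else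
        pvLoopA ls chunks (PySem.Str.strip (pvRemovePrefix stripped "# %%")) [] true
    else
      pvLoopA ls chunks m (body ++ [l]) saw

def split_percent_fmt_py (src : String) : List (String × String) :=
  (pvLoopA (PySem.Str.splitlines src) [] "" [] false).map (fun p => (p.1, pvFin p.2))

-- ===== PORT B =====
-- tail_chunks of Source B: span off the body up to the next marker, recurse on the remainder
def pvTail : String → List String → List (String × String)
  | m, rest =>
    let body := rest.takeWhile (fun l => !pvIsMark l)
    match h : rest.dropWhile (fun l => !pvIsMark l) with
    | [] =>
        have _hk := h  -- name kept for the decreasing_by proof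
        [(m, pvFin body)]
    | l :: rs =>
        (m, pvFin body) :: pvTail (pvMarkText l) rs
  termination_by _ rest => rest.length
  decreasing_by
    have hle := List.length_dropWhile_le (fun l => !pvIsMark l) rest
    rw [h] at hle
    simp at hle ⊢
    omega

def split_percent_fmt_py_alt (src : String) : List (String × String) :=
  let lines := PySem.Str.splitlines src
  let pre := lines.takeWhile (fun l => !pvIsMark l)
  match lines.dropWhile (fun l => !pvIsMark l) with
  | [] => [("", pvFin pre)]
  | l :: rs =>
      (if pre.isEmpty then [] else [("", pvFin pre)]) ++ pvTail (pvMarkText l) rs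

-- ===== PRECONDITION & SPEC =====
def Spec_split_percent_fmt_py (src : String) (out : List (String × String)) : Prop := out = split_percent_fmt_py_alt src
instance (src : String) (out : List (String × String)) : Decidable (Spec_split_percent_fmt_py src out) := by unfold Spec_split_percent_fmt_py; infer_instance

-- ===== CLAIM (what is proved, stated in full; the proofs are below) =====
def Claim_equal_split_percent_fmt_py : Prop := ∀ (src : String), Dom_split_percent_fmt_py src → Spec_split_percent_fmt_py src (split_percent_fmt_py src)

-- ===== LEMMAS AND PROOFS =====

-- A's loop after the first marker (saw_percent = True), as a simple recursion
def pvRaw : String → List String → List String → List (String × List String)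
  | m, body, [] => [(m, body)]
  | m, body, l :: ls =>
    if pvIsMark l then (m, body) :: pvRaw (pvMarkText l) [] ls
    else pvRaw m (body ++ [l]) ls

theorem pvLoopA_true (ls : List String) : ∀ (chunks : List (String × List String)) (m : String)
    (body : List String), pvLoopA ls chunks m body true = chunks ++ pvRaw m body ls := by
  induction ls with
  | nil => intro chunks m body; simp only [pvLoopA, pvRaw]
  | cons l ls ih =>
    intro chunks m body
    simp only [pvLoopA,
      show PySem.Str.startswith (PySem.Str.lstrip (PySem.Str.lower l)) "# %%" = pvIsMark l from rfl,
      show PySem.Str.strip (pvRemovePrefix (PySem.Str.lstrip (PySem.Str.lower l)) "# %%")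
        = pvMarkText l from rfl, Bool.or_true]
    by_cases hm : pvIsMark l
    · simp only [pvRaw, hm, if_pos, ih]
      simp
    · simp only [pvRaw, hm, Bool.false_eq_true, if_false, ih]

-- pvRaw in span form (the shape of B's tail_chunks)
theorem pvRaw_span (ls : List String) : ∀ (m : String) (body : List String),
    pvRaw m body ls =
      match ls.dropWhile (fun l => !pvIsMark l) with
      | [] => [(m, body ++ ls.takeWhile (fun l => !pvIsMark l))]
      | l :: rs => (m, body ++ ls.takeWhile (fun l => !pvIsMark l)) :: pvRaw (pvMarkText l) [] rs := by
  induction ls with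
  | nil => intro m body; simp [pvRaw]
  | cons l ls ih =>
    intro m body
    by_cases hm : pvIsMark l
    · simp [pvRaw, hm]
    · simp only [pvRaw, hm, Bool.false_eq_true, if_false, List.dropWhile_cons,
        List.takeWhile_cons, Bool.not_false, ih m (body ++ [l])]
      simp

theorem pvTail_eq_raw (rest : List String) (m : String) :
    pvTail m rest = (pvRaw m [] rest).map (fun p => (p.1, pvFin p.2)) := by
  induction m, rest using pvTail.induct with
  | case1 m rest h =>
    rw [pvTail, pvRaw_span]
    simp only [h]
    split <;> simp_all
  | case2 m rest l rs h ih =>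
    rw [pvTail, pvRaw_span]
    simp only [h]
    split <;> simp_all [List.map]

-- A's loop from the initial state (saw_percent = False)
theorem pvLoopA_false (ls : List String) : ∀ (chunks : List (String × List String)) (m : String)
    (body : List String),
    pvLoopA ls chunks m body false =
      match ls.dropWhile (fun l => !pvIsMark l) with
      | [] => chunks ++ [(m, body ++ ls.takeWhile (fun l => !pvIsMark l))]
      | l :: rs => chunks ++
          (if (body ++ ls.takeWhile (fun l => !pvIsMark l)).isEmpty then []
           else [(m, body ++ ls.takeWhile (fun l => !pvIsMark l))]) ++
          pvRaw (pvMarkText l) [] rs := by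
  induction ls with
  | nil => intro chunks m body; simp [pvLoopA]
  | cons l ls ih =>
    intro chunks m body
    simp only [pvLoopA,
      show PySem.Str.startswith (PySem.Str.lstrip (PySem.Str.lower l)) "# %%" = pvIsMark l from rfl,
      show PySem.Str.strip (pvRemovePrefix (PySem.Str.lstrip (PySem.Str.lower l)) "# %%")
        = pvMarkText l from rfl, Bool.or_false]
    by_cases hm : pvIsMark l
    · simp only [hm, List.dropWhile_cons, List.takeWhile_cons, Bool.not_true,
        Bool.false_eq_true, if_false, List.append_nil]
      by_cases hb : body.isEmpty
      · rw [List.isEmpty_iff] at hb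
        subst hb
        simp [pvLoopA_true]
      · simp only [hb, Bool.not_false, pvLoopA_true]
        simp
    · simp only [hm, Bool.false_eq_true, if_false, List.dropWhile_cons, List.takeWhile_cons,
        Bool.not_false, ih chunks m (body ++ [l])]
      simp

-- ===== VERDICT (by name: the statement is the Claim_ definition above) =====
theorem split_percent_fmt_py_spec : Claim_equal_split_percent_fmt_py := by
  intro src _
  unfold Spec_split_percent_fmt_py split_percent_fmt_py split_percent_fmt_py_alt
  rw [pvLoopA_false]
  cases h : (PySem.Str.splitlines src).dropWhile (fun l => !pvIsMark l) with
  | nil => simp [h, pvFin]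
  | cons l rs =>
    simp only [h, List.nil_append]
    rw [pvTail_eq_raw, List.map_append]
    by_cases hp : ((PySem.Str.splitlines src).takeWhile (fun l => !pvIsMark l)).isEmpty
    · simp [hp]
    · simp [hp]
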